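-- pv_equiv track=rewrite | github.com/jlescher/adventofcode | 2017/day24/solve.py | build_bridge
-- ===== SOURCE A (Python) =====
-- def build_bridge(node, edges):
--     bridge_weight = 0
--     for edge in edges:
--         if node in edge:
--             edges_left = edges[:]
--             edges_left.remove(edge)
--             bridge_weight = max(build_bridge(sum(edge)-node, edges_left), bridge_weight)
--     if bridge_weight == 0: # Leaf
--         return node
--     else: # At least one domino can be connected to node
--         return bridge_weight + 2*node
-- ===== SOURCE B (Python) =====
-- def build_bridge(node, edges):
--     # Memoized search: canonicalize the edge multiset by sorting once; states
--     # (node, remaining sorted tuple) are cached so permutations of the same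
--     # remaining multiset are computed only once.
--     memo = {}
--
--     def go(node, edges):
--         key = (node, edges)
--         if key in memo:
--             return memo[key]
--         best = 0
--         for i, edge in enumerate(edges):
--             if node in edge:
--                 best = max(best, go(sum(edge) - node, edges[:i] + edges[i + 1:]))
--         res = node if best == 0 else best + 2 * node
--         memo[key] = res
--         return res
--
--     return go(node, tuple(sorted(tuple(e) for e in edges)))
-- ===== Notes on version B (the rewrite author's own statement) =====
-- stated objective: alternative
-- what changed: Replaces the bare recursion over all edge orderings by a memoized depth-first search keyed on (current node, sorted tuple of remaining edges), so permutations of the same remaining multiset are computed once; on dense edge sets this dedupes states, on sparse inputs cost is comparable.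
import Mathlib
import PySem

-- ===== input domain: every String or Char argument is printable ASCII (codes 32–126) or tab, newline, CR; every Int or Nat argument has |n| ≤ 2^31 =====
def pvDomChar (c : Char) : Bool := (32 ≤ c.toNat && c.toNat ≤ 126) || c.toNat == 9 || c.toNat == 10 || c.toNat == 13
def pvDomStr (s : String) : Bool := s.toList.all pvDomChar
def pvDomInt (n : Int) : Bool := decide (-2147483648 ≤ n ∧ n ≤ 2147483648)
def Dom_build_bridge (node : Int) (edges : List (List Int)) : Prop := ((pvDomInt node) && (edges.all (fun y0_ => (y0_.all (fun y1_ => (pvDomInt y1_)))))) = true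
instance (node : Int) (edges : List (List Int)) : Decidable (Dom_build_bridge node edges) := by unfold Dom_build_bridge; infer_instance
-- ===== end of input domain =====

-- B replaces A's bare recursion over edge orderings by a memoized search keyed on
-- (node, sorted remaining edge multiset); same return value everywhere (alternative algorithm).

-- ===== PORT A =====
-- Fueled transliteration of A's recursion; the fuel is only a totality guard:
-- every reachable call has fuel > edges.length (each recursive call drops one edge).
def bbGoA : Nat → Int → List (List Int) → Int
  | 0, node, _ => node  -- unreachable (fuel guard)
  | fuel+1, node, edges =>
    let bw := edges.foldl (fun bw edge =>
      if node ∈ edge then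
        -- edges_left = edges[:]; edges_left.remove(edge) — never raises, edge ∈ edges
        max (bbGoA fuel (edge.sum - node) ((PySem.List.remove? edges edge).getD [])) bw
      else bw) 0
    if bw = 0 then node else bw + 2 * node

def build_bridge (node : Int) (edges : List (List Int)) : Int :=
  bbGoA (edges.length + 1) node edges

-- ===== PORT B =====
-- Inner memoized search `go`; memo is a dict keyed by (node, remaining edges).
-- Fuel is only a totality guard (every reachable call has fuel > edges.length).
def bbGoB : Nat → Int → List (List Int) → PySem.Dict (Int × List (List Int)) Int →
    Int × PySem.Dict (Int × List (List Int)) Int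
  | 0, node, _, memo => (node, memo)  -- unreachable (fuel guard)
  | fuel+1, node, edges, memo =>
    match memo.get? (node, edges) with
    | some v => (v, memo)
    | none =>
      let st := (PySem.List.enumerate edges).foldl
        (fun (st : Int × PySem.Dict (Int × List (List Int)) Int) p =>
          if node ∈ p.2 then
            -- edges[:i] + edges[i+1:]
            let r := bbGoB fuel (p.2.sum - node)
              (PySem.List.slice edges none (some p.1) ++
               PySem.List.slice edges (some (p.1 + 1)) none) st.2
            (max st.1 r.1, r.2)
          else st) ((0 : Int), memo)
      let res := if st.1 = 0 then node else st.1 + 2 * node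
      (res, st.2.insert (node, edges) res)

-- go(node, tuple(sorted(tuple(e) for e in edges))) with a fresh memo
def build_bridge_alt (node : Int) (edges : List (List Int)) : Int :=
  (bbGoB (edges.length + 1) node (PySem.List.sorted edges (fun e => e) false)
    PySem.Dict.empty).1

-- ===== PRECONDITION & SPEC =====
def Spec_build_bridge (node : Int) (edges : List (List Int)) (out : Int) : Prop := out = build_bridge_alt node edges
instance (node : Int) (edges : List (List Int)) (out : Int) : Decidable (Spec_build_bridge node edges out) := by unfold Spec_build_bridge; infer_instance

-- ===== CLAIM (what is proved, stated in full; the proofs are below) =====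
def Claim_equal_build_bridge : Prop := ∀ (node : Int) (edges : List (List Int)), Dom_build_bridge node edges → Spec_build_bridge node edges (build_bridge node edges)

-- ===== LEMMAS AND PROOFS =====

-- A's loop body, with remove? rewritten to List.erase on members.
theorem bbGoA_succ (g : Nat) (node : Int) (edges : List (List Int)) :
    bbGoA (g+1) node edges =
      (fun bw => if bw = 0 then node else bw + 2 * node)
        (edges.foldl (fun bw edge =>
          if node ∈ edge then
            max (bbGoA g (edge.sum - node) (edges.erase edge)) bw
          else bw) 0) := by
  have h : edges.foldl (fun bw edge =>
      if node ∈ edge then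
        max (bbGoA g (edge.sum - node) ((PySem.List.remove? edges edge).getD [])) bw
      else bw) 0
    = edges.foldl (fun bw edge =>
      if node ∈ edge then
        max (bbGoA g (edge.sum - node) (edges.erase edge)) bw
      else bw) 0 := by
    refine PySem.List.foldl_congr_mem _ _ _ _ ?_
    intro acc x hx
    rw [PySem.List.remove?_eq_some_erase edges x hx, Option.getD_some]
  simp only [bbGoA, h]

-- fuel irrelevance: any sufficient fuel gives the same value
theorem bbGoA_fuel : ∀ (f1 f2 : Nat) (node : Int) (edges : List (List Int)),
    edges.length < f1 → edges.length < f2 → bbGoA f1 node edges = bbGoA f2 node edges := by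
  intro f1
  induction f1 with
  | zero => intro f2 node edges h1 _; omega
  | succ g1 ih =>
    intro f2 node edges h1 h2
    cases f2 with
    | zero => omega
    | succ g2 =>
      rw [bbGoA_succ, bbGoA_succ]
      have h : edges.foldl (fun bw e =>
          if node ∈ e then max (bbGoA g1 (e.sum - node) (edges.erase e)) bw else bw) 0
        = edges.foldl (fun bw e =>
          if node ∈ e then max (bbGoA g2 (e.sum - node) (edges.erase e)) bw else bw) 0 := by
        refine PySem.List.foldl_congr_mem _ _ _ _ ?_
        intro acc x hx
        have hl := List.length_erase_of_mem hx
        have hpos : 1 ≤ edges.length := by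
          cases edges with | nil => simp at hx | cons a t => simp
        rw [ih g2 _ _ (by omega) (by omega)]
      rw [h]

-- permutation invariance of A's value
theorem bbGoA_perm : ∀ (fuel : Nat) (node : Int) (l1 l2 : List (List Int)),
    l1.Perm l2 → l1.length < fuel → bbGoA fuel node l1 = bbGoA fuel node l2 := by
  intro fuel
  induction fuel with
  | zero => intro node l1 l2 _ h; omega
  | succ g ih =>
    intro node l1 l2 hp h
    rw [bbGoA_succ, bbGoA_succ]
    have hlen := hp.length_eq
    -- rewrite l2's body to erase from l1
    have step1 : l2.foldl (fun bw e => if node ∈ e then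
          max (bbGoA g (e.sum - node) (l2.erase e)) bw else bw) 0
        = l2.foldl (fun bw e => if node ∈ e then
          max (bbGoA g (e.sum - node) (l1.erase e)) bw else bw) 0 := by
      refine PySem.List.foldl_congr_mem _ _ _ _ ?_
      intro acc x hx
      have hx1 : x ∈ l1 := hp.mem_iff.mpr hx
      have hl := List.length_erase_of_mem hx
      have hpos : 1 ≤ l2.length := by
        cases l2 with | nil => simp at hx | cons a t => simp
      rw [ih _ (l2.erase x) (l1.erase x) (hp.erase x).symm (by omega)]
    rw [step1]
    congr 1
    refine hp.foldl_eq' ?_ 0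
    intro x _ y _ z
    by_cases hx : node ∈ x <;> by_cases hy : node ∈ y <;> simp [hx, hy]
    exact max_left_comm _ _ _

theorem build_bridge_perm (node : Int) (l1 l2 : List (List Int)) (hp : l1.Perm l2) :
    build_bridge node l1 = build_bridge node l2 := by
  unfold build_bridge
  rw [bbGoA_perm (l1.length + 1) node l1 l2 hp (by omega)]
  have hlen := hp.length_eq
  exact bbGoA_fuel _ _ _ _ (by omega) (by omega)

-- build_bridge's own unfolding in terms of itself (fuel eliminated)
theorem build_bridge_eq (node : Int) (edges : List (List Int)) :
    build_bridge node edges =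
      (fun bw => if bw = 0 then node else bw + 2 * node)
        (edges.foldl (fun bw e =>
          if node ∈ e then
            max (build_bridge (e.sum - node) (edges.erase e)) bw
          else bw) 0) := by
  unfold build_bridge
  rw [bbGoA_succ]
  have h : edges.foldl (fun bw e =>
      if node ∈ e then max (bbGoA edges.length (e.sum - node) (edges.erase e)) bw else bw) 0
    = edges.foldl (fun bw e =>
      if node ∈ e then max (bbGoA ((edges.erase e).length + 1) (e.sum - node) (edges.erase e)) bw else bw) 0 := by
    refine PySem.List.foldl_congr_mem _ _ _ _ ?_
    intro acc x hx
    have hl := List.length_erase_of_mem hx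
    have hpos : 1 ≤ edges.length := by
      cases edges with | nil => simp at hx | cons a t => simp
    rw [bbGoA_fuel edges.length ((edges.erase x).length + 1) _ _ (by omega) (by omega)]
  rw [h]

-- memo invariant: every stored value is A's value for its key
def MemoInv (m : PySem.Dict (Int × List (List Int)) Int) : Prop :=
  ∀ k v, m.get? k = some v → v = build_bridge k.1 k.2

-- eraseIdx and erase-at-the-value are permutations
theorem eraseIdx_perm_erase (edges : List (List Int)) (k : Nat) (hk : k < edges.length) :
    (edges.eraseIdx k).Perm (edges.erase edges[k]) := by
  have h1 : edges.Perm (edges[k] :: edges.eraseIdx k) := by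
    conv_lhs => rw [← List.take_append_drop k edges]
    rw [← List.getElem_cons_drop hk, List.eraseIdx_eq_take_drop_succ]
    exact List.perm_middle
  have h2 : edges.Perm (edges[k] :: edges.erase edges[k]) :=
    List.perm_cons_erase (edges.getElem_mem hk)
  exact (List.Perm.cons_inv (h1.symm.trans h2))

-- fold over enumerate ignoring the index = fold over the list
theorem foldl_enumerate_snd {α β : Type} (l : List α) (G : β → α → β) :
    ∀ (s : Int) (init : β),
      (PySem.List.enumerate l s).foldl (fun b p => G b p.2) init = l.foldl G init := by
  induction l with
  | nil => intro s init; simp [PySem.List.enumerate]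
  | cons x xs ih =>
    intro s init
    rw [PySem.List.enumerate_cons]
    simp only [List.foldl_cons]
    exact ih (s+1) (G init x)

-- the inner fold of bbGoB: values are A's values, memo invariant is preserved
theorem foldB (g : Nat) (node : Int) (edges : List (List Int))
    (HIH : ∀ (node' : Int) (edges' : List (List Int)) memo', edges'.length < g → MemoInv memo' →
      (bbGoB g node' edges' memo').1 = build_bridge node' edges' ∧
      MemoInv (bbGoB g node' edges' memo').2)
    (hlen : edges.length ≤ g) :
    ∀ (ps : List (Int × List Int)) (st : Int × PySem.Dict (Int × List (List Int)) Int),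
      (∀ p ∈ ps, ∃ (k : Nat) (hk : k < edges.length), p = ((k : Int), edges[k])) →
      MemoInv st.2 →
      MemoInv ((ps.foldl (fun st p =>
          if node ∈ p.2 then
            let r := bbGoB g (p.2.sum - node)
              (PySem.List.slice edges none (some p.1) ++
               PySem.List.slice edges (some (p.1 + 1)) none) st.2
            (max st.1 r.1, r.2)
          else st) st)).2 ∧
      (ps.foldl (fun st p =>
          if node ∈ p.2 then
            let r := bbGoB g (p.2.sum - node)
              (PySem.List.slice edges none (some p.1) ++
               PySem.List.slice edges (some (p.1 + 1)) none) st.2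
            (max st.1 r.1, r.2)
          else st) st).1 =
        ps.foldl (fun b p =>
          if node ∈ p.2 then
            max b (build_bridge (p.2.sum - node) (edges.eraseIdx p.1.toNat))
          else b) st.1 := by
  intro ps
  induction ps with
  | nil => intro st _ hinv; exact ⟨hinv, rfl⟩
  | cons p ps ih =>
    intro st hmem hinv
    obtain ⟨k, hk, hpk⟩ := hmem p (List.mem_cons_self ..)
    simp only [List.foldl_cons]
    by_cases hc : node ∈ p.2
    · simp only [hc, if_pos]
      have hslice : PySem.List.slice edges none (some p.1) ++
          PySem.List.slice edges (some (p.1 + 1)) none = edges.eraseIdx p.1.toNat := by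
        subst hpk
        rw [PySem.List.slice_to edges (by positivity), PySem.List.slice_from edges (by positivity)]
        have h1 : ((k : Int)).toNat = k := Int.toNat_natCast k
        have h2 : ((k : Int) + 1).toNat = k + 1 := by omega
        rw [h1, h2, ← List.eraseIdx_eq_take_drop_succ]
      rw [hslice]
      have hkk : p.1.toNat < edges.length := by subst hpk; simpa using hk
      have hrec := HIH (p.2.sum - node) (edges.eraseIdx p.1.toNat) st.2
        (by rw [List.length_eraseIdx, if_pos hkk]; omega) hinv
      exact (hrec.1 ▸ ih _ (fun q hq => hmem q (List.mem_cons_of_mem _ hq)) hrec.2)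
    · simp only [hc, if_neg, not_false_iff]
      exact ih _ (fun q hq => hmem q (List.mem_cons_of_mem _ hq)) hinv

-- correctness of the memoized search
theorem bbGoB_correct : ∀ (fuel : Nat) (node : Int) (edges : List (List Int)) memo,
    edges.length < fuel → MemoInv memo →
    (bbGoB fuel node edges memo).1 = build_bridge node edges ∧
    MemoInv (bbGoB fuel node edges memo).2 := by
  intro fuel
  induction fuel with
  | zero => intro node edges memo h _; omega
  | succ g ih =>
    intro node edges memo hlen hinv
    simp only [bbGoB]
    cases hget : memo.get? (node, edges) with
    | some v => exact ⟨hinv _ v hget, hinv⟩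
    | none =>
      simp only
      have hmem : ∀ p ∈ PySem.List.enumerate edges, ∃ (k : Nat) (hk : k < edges.length),
          p = ((k : Int), edges[k]) := by
        intro p hp
        obtain ⟨k, hk, hpk⟩ := (PySem.List.mem_enumerate_iff edges 0 p).mp hp
        exact ⟨k, hk, by simpa using hpk⟩
      have hfold := foldB g node edges ih (by omega) (PySem.List.enumerate edges)
        ((0 : Int), memo) hmem hinv
      set st := (PySem.List.enumerate edges).foldl (fun st p =>
          if node ∈ p.2 then
            let r := bbGoB g (p.2.sum - node)
              (PySem.List.slice edges none (some p.1) ++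
               PySem.List.slice edges (some (p.1 + 1)) none) st.2
            (max st.1 r.1, r.2)
          else st) ((0 : Int), memo) with hst
      -- the accumulated best equals A's bridge_weight
      have hbest : st.1 = edges.foldl (fun bw e =>
          if node ∈ e then max (build_bridge (e.sum - node) (edges.erase e)) bw else bw) 0 := by
        rw [hfold.2]
        have e1 : (PySem.List.enumerate edges).foldl (fun b p =>
            if node ∈ p.2 then
              max b (build_bridge (p.2.sum - node) (edges.eraseIdx p.1.toNat))
            else b) 0
          = (PySem.List.enumerate edges).foldl (fun b p =>
            if node ∈ p.2 then
              max b (build_bridge (p.2.sum - node) (edges.erase p.2))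
            else b) 0 := by
          refine PySem.List.foldl_congr_mem _ _ _ _ ?_
          intro acc p hp
          obtain ⟨k, hk, hpk⟩ := hmem p hp
          subst hpk
          simp only [Int.toNat_natCast]
          rw [build_bridge_perm _ _ _ (eraseIdx_perm_erase edges k hk)]
        rw [e1, foldl_enumerate_snd edges
          (fun b e => if node ∈ e then max b (build_bridge (e.sum - node) (edges.erase e)) else b) 0 0]
        refine PySem.List.foldl_congr_mem _ _ _ _ ?_
        intro acc x _
        by_cases hx : node ∈ x <;> simp [hx, max_comm]
      constructor
      · rw [hbest, build_bridge_eq]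
      · intro k v hkv
        rw [PySem.Dict.get?_insert] at hkv
        split at hkv
        · rename_i hk
          subst hk
          simp only [Option.some.injEq] at hkv
          rw [← hkv, hbest, build_bridge_eq]
        · exact hfold.1 _ _ hkv

theorem memoInv_empty : MemoInv (PySem.Dict.empty : PySem.Dict (Int × List (List Int)) Int) := by
  intro k v h
  simp [PySem.Dict.empty, PySem.Dict.get?] at h

-- ===== VERDICT (by name: the statement is the Claim_ definition above) =====
theorem build_bridge_spec : Claim_equal_build_bridge := by
  intro node edges _
  unfold Spec_build_bridge build_bridge_alt
  have hperm := PySem.List.sorted_perm edges (fun e => e) false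
  have hlen : (PySem.List.sorted edges (fun e => e) false).length = edges.length :=
    hperm.length_eq
  rw [(bbGoB_correct (edges.length + 1) node _ PySem.Dict.empty (by omega) memoInv_empty).1]
  exact (build_bridge_perm node _ edges hperm).symm
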